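-- pv_equiv track=rewrite | github.com/Mosalah992/PlagueMonitor | orchestrator/intelligence.py | lineage_depths
-- ===== SOURCE A (Python) =====
-- from collections import Counter, defaultdict
-- from typing import Any, Dict, Iterable, List, Optional, Sequence, Tuple
--
-- def stable_unique(values: Iterable[Any]) -> List[str]:
--     seen: set[str] = set()
--     output: List[str] = []
--     for value in values:
--         text = str(value or "").strip()
--         if not text or text in seen:
--             continue
--         seen.add(text)
--         output.append(text)
--     return output
--
-- def lineage_depths(events: Sequence[Dict[str, Any]]) -> Tuple[Dict[str, int], Dict[str, str], Dict[str, List[str]], List[str]]: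
--     parent_by_child: Dict[str, str] = {}
--     children_by_parent: Dict[str, List[str]] = defaultdict(list)
--     warnings: List[str] = []
--
--     for event in events:
--         child = str(event.get("payload_hash") or "").strip()
--         parent = str(event.get("parent_payload_hash") or "").strip()
--         if not child:
--             continue
--         if parent and child not in parent_by_child:
--             parent_by_child[child] = parent
--             children_by_parent[parent].append(child)
--         elif parent and parent_by_child.get(child) not in {None, "", parent}:
--             warnings.append(
--                 f"Payload lineage ambiguity: payload {child} was observed with multiple parents."
--             )
--
--     depth_cache: Dict[str, int] = {}
--     root_cache: Dict[str, str] = {}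
--
--     def compute_depth(payload_hash: str, trail: Optional[set[str]] = None) -> int:
--         if not payload_hash:
--             return 0
--         if payload_hash in depth_cache:
--             return depth_cache[payload_hash]
--         seen = set(trail or set())
--         if payload_hash in seen:
--             warnings.append(f"Payload lineage cycle detected at {payload_hash}.")
--             depth_cache[payload_hash] = 0
--             root_cache[payload_hash] = payload_hash
--             return 0
--         seen.add(payload_hash)
--         parent = parent_by_child.get(payload_hash, "")
--         if not parent:
--             depth_cache[payload_hash] = 0
--             root_cache[payload_hash] = payload_hash
--             return 0
--         parent_depth = compute_depth(parent, seen)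
--         depth_cache[payload_hash] = parent_depth + 1
--         root_cache[payload_hash] = root_cache.get(parent, parent or payload_hash)
--         return depth_cache[payload_hash]
--
--     all_hashes = stable_unique(
--         [event.get("payload_hash") for event in events] + [event.get("parent_payload_hash") for event in events]
--     )
--     for payload_hash in all_hashes:
--         compute_depth(payload_hash)
--     return depth_cache, root_cache, dict(children_by_parent), stable_unique(warnings)
-- ===== SOURCE B (Python) =====
-- def lineage_depths(events):
--     # pre-extract the (child, parent) pairs once
--     pairs = [
--         (str(e.get("payload_hash") or "").strip(), str(e.get("parent_payload_hash") or "").strip())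
--         for e in events
--     ]
--
--     # first-wins parent map
--     parent_by_child = {}
--     for c, p in pairs:
--         if c and p and c not in parent_by_child:
--             parent_by_child[c] = p
--
--     # children grouped from the final map (insertion order of parent_by_child
--     # is exactly the order in which A appends children)
--     children_by_parent = {}
--     for c, p in parent_by_child.items():
--         children_by_parent.setdefault(p, []).append(c)
--
--     # ambiguity warnings: any event whose parent disagrees with the recorded one
--     warnings = [
--         f"Payload lineage ambiguity: payload {c} was observed with multiple parents."
--         for c, p in pairs
--         if c and p and parent_by_child.get(c) != p
--     ]
--
--     depth_cache = {}
--     root_cache = {}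
--
--     def resolve(start):
--         # descend iteratively, keeping the path as a stack + membership set
--         path = []
--         on_path = set()
--         cur = start
--         while True:
--             if cur in depth_cache:
--                 depth, root = depth_cache[cur], root_cache.get(cur, cur)
--                 break
--             if cur in on_path:
--                 warnings.append(f"Payload lineage cycle detected at {cur}.")
--                 depth_cache[cur] = 0
--                 root_cache[cur] = cur
--                 depth, root = 0, cur
--                 break
--             parent = parent_by_child.get(cur, "")
--             if not parent:
--                 depth_cache[cur] = 0
--                 root_cache[cur] = cur
--                 depth, root = 0, cur
--                 break
--             path.append(cur)
--             on_path.add(cur)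
--             cur = parent
--         # unwind once, assigning depths/roots back down the path
--         for node in reversed(path):
--             depth += 1
--             depth_cache[node] = depth
--             root_cache[node] = root
--
--     def uniq(values):
--         return list(dict.fromkeys(t for t in (str(v or "").strip() for v in values) if t))
--
--     all_hashes = uniq(
--         [e.get("payload_hash") for e in events] + [e.get("parent_payload_hash") for e in events]
--     )
--     for h in all_hashes:
--         resolve(h)
--     return depth_cache, root_cache, children_by_parent, uniq(warnings)
-- ===== Notes on version B (the rewrite author's own statement) =====
-- stated objective: alternative
-- what changed: A's single interleaved event loop (building parent map, child groups and warnings together) and its recursive depth walk that copies the ancestor set at every call are replaced by staged passes: extract the (child,parent) pairs once, a first-wins fold builds the parent map, the child groups are reconstructed afterwards by one grouping pass over that final map's items, the ambiguity warnings by one filter of the pairs against the final map, and depths/roots are resolved iteratively with one explicit path stack plus an on-path set and a single unwind pass (dedup via dict.fromkeys); …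
import Mathlib
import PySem

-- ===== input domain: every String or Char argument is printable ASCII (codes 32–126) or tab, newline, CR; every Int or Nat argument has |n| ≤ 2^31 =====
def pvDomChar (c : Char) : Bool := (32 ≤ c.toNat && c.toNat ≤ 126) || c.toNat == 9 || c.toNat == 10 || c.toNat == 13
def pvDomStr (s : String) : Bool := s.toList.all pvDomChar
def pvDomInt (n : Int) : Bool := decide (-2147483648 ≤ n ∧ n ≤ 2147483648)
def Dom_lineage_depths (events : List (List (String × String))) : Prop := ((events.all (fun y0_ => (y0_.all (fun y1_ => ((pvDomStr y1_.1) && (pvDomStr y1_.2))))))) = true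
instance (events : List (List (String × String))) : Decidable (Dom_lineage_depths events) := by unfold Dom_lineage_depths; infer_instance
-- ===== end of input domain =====

-- B replaces A's single interleaved event loop and recursive, set-copying depth walk by
-- staged passes: a first-wins parent map, a grouping pass over that final map, a warning
-- filter against it, and an iterative depth resolve with one path stack and an unwind pass
-- (objective: alternative algorithm, same result).

-- state threaded through the depth computation: (depth_cache, root_cache, warnings)
abbrev PvSt := PySem.Dict String Int × PySem.Dict String String × List String

def pvAmbigMsg (child : String) : String :=
  "Payload lineage ambiguity: payload " ++ child ++ " was observed with multiple parents."

def pvCycleMsg (p : String) : String :=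
  "Payload lineage cycle detected at " ++ p ++ "."

-- ===== PORT A =====

-- stable_unique over strings; callers pass (raw.get? …).getD "" for Optional values
-- (str(value or "") is the identity on a string, so only .strip() remains here)
def pvStableUnique (values : List String) : List String :=
  (values.foldl
    (fun (acc : PySem.Set String × List String) v =>
      let text := PySem.Str.strip v
      if text = "" ∨ PySem.Set.contains acc.1 text then acc
      else (PySem.Set.add acc.1 text, acc.2 ++ [text]))
    (PySem.Set.empty, [])).2

-- the first loop of lineage_depths: builds (parent_by_child, children_by_parent, warnings)
def pvStepA (st : PySem.Dict String String × PySem.Dict String (List String) × List String)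
    (ev : List (String × String)) :
    PySem.Dict String String × PySem.Dict String (List String) × List String :=
  let child := PySem.Str.strip (((PySem.Dict.mk ev).get? "payload_hash").getD "")
  let parent := PySem.Str.strip (((PySem.Dict.mk ev).get? "parent_payload_hash").getD "")
  if child = "" then st
  else if parent ≠ "" ∧ st.1.get? child = none then
    (st.1.insert child parent,
     st.2.1.insert parent (st.2.1.getD parent [] ++ [child]),
     st.2.2)
  else if parent ≠ "" ∧ st.1.get? child ≠ none ∧ st.1.get? child ≠ some "" ∧
          st.1.get? child ≠ some parent then
    (st.1, st.2.1, st.2.2 ++ [pvAmbigMsg child])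
  else st

-- compute_depth(payload_hash, trail); fuel only makes the recursion structural — it starts at
-- parent_by_child.size + 1, which the descent (distinct keys of parent_by_child) never exhausts
def pvCdA (pbc : PySem.Dict String String) : Nat → String → PySem.Set String → PvSt → Int × PvSt
  | 0, _, _, st => (0, st)
  | fuel + 1, p, trail, st =>
    if p = "" then (0, st)
    else
      match st.1.get? p with
      | some d => (d, st)
      | none =>
        if PySem.Set.contains trail p then
          (0, (st.1.insert p 0, st.2.1.insert p p, st.2.2 ++ [pvCycleMsg p]))
        else
          let parent := pbc.getD p ""
          if parent = "" then (0, (st.1.insert p 0, st.2.1.insert p p, st.2.2))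
          else
            let r := pvCdA pbc fuel parent (PySem.Set.add trail p) st
            -- root_cache.get(parent, parent or payload_hash): parent ≠ "" here, so the default is parent
            (r.1 + 1,
             ((r.2).1.insert p (r.1 + 1),
              (r.2).2.1.insert p ((r.2).2.1.getD parent parent),
              (r.2).2.2))

def lineage_depths (events : List (List (String × String))) : (List (String × Int)) × (List (String × String)) × (List (String × List String)) × List String :=
  let st1 := events.foldl pvStepA (PySem.Dict.empty, PySem.Dict.empty, [])
  let allHashes := pvStableUnique
    (events.map (fun ev => ((PySem.Dict.mk ev).get? "payload_hash").getD "") ++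
     events.map (fun ev => ((PySem.Dict.mk ev).get? "parent_payload_hash").getD ""))
  let st2 := allHashes.foldl
    (fun (st : PvSt) h => (pvCdA st1.1 (st1.1.size + 1) h PySem.Set.empty st).2)
    (PySem.Dict.empty, PySem.Dict.empty, st1.2.2)
  (st2.1.items, st2.2.1.items, st1.2.1.items, pvStableUnique st2.2.2)

-- ===== PORT B =====

-- (child, parent) of one event, both stripped
def pvExtract (ev : List (String × String)) : String × String :=
  (PySem.Str.strip (((PySem.Dict.mk ev).get? "payload_hash").getD ""),
   PySem.Str.strip (((PySem.Dict.mk ev).get? "parent_payload_hash").getD ""))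

-- first-wins parent map: if c and p and c not in parent_by_child: parent_by_child[c] = p
def pvRecord (d : PySem.Dict String String) (cp : String × String) : PySem.Dict String String :=
  if cp.1 ≠ "" ∧ cp.2 ≠ "" ∧ d.get? cp.1 = none then d.insert cp.1 cp.2 else d

-- grouping pass: children_by_parent.setdefault(p, []).append(c)
def pvGroupStep (g : PySem.Dict String (List String)) (cp : String × String) :
    PySem.Dict String (List String) :=
  g.insert cp.2 (g.getD cp.2 [] ++ [cp.1])

-- warning comprehension: if c and p and parent_by_child.get(c) != p
def pvWarn1 (pbc : PySem.Dict String String) (cp : String × String) : Option String :=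
  if cp.1 ≠ "" ∧ cp.2 ≠ "" ∧ pbc.get? cp.1 ≠ some cp.2 then some (pvAmbigMsg cp.1) else none

-- uniq: list(dict.fromkeys(t for t in (str(v or "").strip() for v in values) if t))
def pvUniq (values : List String) : List String :=
  (((values.map PySem.Str.strip).filter (fun t => t ≠ "")).foldl
    (fun (d : PySem.Dict String Unit) t => d.insert t ()) PySem.Dict.empty).keys

-- the unwind pass: for node in reversed(path): depth += 1; set caches
def pvUnwind : List String → Int × String → PvSt → PvSt
  | [], _, st => st
  | n :: rest, dr, st =>
    pvUnwind rest (dr.1 + 1, dr.2) (st.1.insert n (dr.1 + 1), st.2.1.insert n dr.2, st.2.2)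

-- the descend loop of resolve; fuel only makes the while-loop structural — it starts at
-- parent_by_child.size + 1 and is never exhausted (the path holds distinct keys of parent_by_child)
def pvGoB (pbc : PySem.Dict String String) :
    Nat → String → List String → PySem.Set String → PvSt → PvSt
  | 0, p, path, _, st => pvUnwind path (0, st.2.1.getD p p) st
  | fuel + 1, cur, path, onPath, st =>
    match st.1.get? cur with
    | some d => pvUnwind path (d, st.2.1.getD cur cur) st
    | none =>
      if PySem.Set.contains onPath cur then
        pvUnwind path (0, cur) (st.1.insert cur 0, st.2.1.insert cur cur, st.2.2 ++ [pvCycleMsg cur])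
      else
        let parent := pbc.getD cur ""
        if parent = "" then
          pvUnwind path (0, cur) (st.1.insert cur 0, st.2.1.insert cur cur, st.2.2)
        else
          pvGoB pbc fuel parent (cur :: path) (PySem.Set.add onPath cur) st

def lineage_depths_alt (events : List (List (String × String))) : (List (String × Int)) × (List (String × String)) × (List (String × List String)) × List String :=
  let pairs := events.map pvExtract
  let pbc := pairs.foldl pvRecord PySem.Dict.empty
  let cbp := pbc.items.foldl pvGroupStep PySem.Dict.empty
  let warns := pairs.filterMap (pvWarn1 pbc)
  let allHashes := pvUniq
    (events.map (fun ev => ((PySem.Dict.mk ev).get? "payload_hash").getD "") ++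
     events.map (fun ev => ((PySem.Dict.mk ev).get? "parent_payload_hash").getD ""))
  let st2 := allHashes.foldl
    (fun (st : PvSt) h => pvGoB pbc (pbc.size + 1) h [] PySem.Set.empty st)
    (PySem.Dict.empty, PySem.Dict.empty, warns)
  (st2.1.items, st2.2.1.items, cbp.items, pvUniq st2.2.2)

-- ===== PRECONDITION & SPEC =====
def Spec_lineage_depths (events : List (List (String × String))) (out : (List (String × Int)) × (List (String × String)) × (List (String × List String)) × List String) : Prop := out = lineage_depths_alt events
instance (events : List (List (String × String))) (out : (List (String × Int)) × (List (String × String)) × (List (String × List String)) × List String) : Decidable (Spec_lineage_depths events out) := by unfold Spec_lineage_depths; infer_instance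

-- ===== CLAIM (what is proved, stated in full; the proofs are below) =====
def Claim_equal_lineage_depths : Prop := ∀ (events : List (List (String × String))), Dom_lineage_depths events → Spec_lineage_depths events (lineage_depths events)

-- ===== LEMMAS AND PROOFS =====

-- A's first loop, rephrased over the extracted (child, parent) pair
def pvStepPairA (st : PySem.Dict String String × PySem.Dict String (List String) × List String)
    (cp : String × String) :
    PySem.Dict String String × PySem.Dict String (List String) × List String :=
  if cp.1 = "" then st
  else if cp.2 ≠ "" ∧ st.1.get? cp.1 = none then
    (st.1.insert cp.1 cp.2,
     st.2.1.insert cp.2 (st.2.1.getD cp.2 [] ++ [cp.1]),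
     st.2.2)
  else if cp.2 ≠ "" ∧ st.1.get? cp.1 ≠ none ∧ st.1.get? cp.1 ≠ some "" ∧
          st.1.get? cp.1 ≠ some cp.2 then
    (st.1, st.2.1, st.2.2 ++ [pvAmbigMsg cp.1])
  else st

-- first-wins: an entry already present survives the rest of the pvRecord fold
theorem pvRecord_mono (ps : List (String × String)) :
    ∀ (d : PySem.Dict String String) (k v : String), d.get? k = some v →
    (ps.foldl pvRecord d).get? k = some v := by
  induction ps with
  | nil => intro d k v h; exact h
  | cons cp ps ih =>
    intro d k v h
    simp only [List.foldl_cons]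
    apply ih
    unfold pvRecord
    split_ifs with hc
    · have hk : k ≠ cp.1 := fun he => by
        rw [he, hc.2.2] at h; exact Option.some_ne_none v h.symm
      rw [PySem.Dict.get?_insert, if_neg hk]; exact h
    · exact h

-- Bool form of membership in an updated set
theorem pvContains_add (s : PySem.Set String) (t x : String) :
    PySem.Set.contains (PySem.Set.add s t) x = (x == t || PySem.Set.contains s x) := by
  by_cases hx : x = t
  · subst hx
    simp only [BEq.rfl, Bool.true_or]
    exact (PySem.Set.contains_iff _ _).mpr ((PySem.Set.mem_add s x x).mpr (Or.inr rfl))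
  · have hbx : (x == t) = false := beq_eq_false_iff_ne.mpr hx
    rw [hbx, Bool.false_or]
    cases hs : PySem.Set.contains s x with
    | true =>
      exact (PySem.Set.contains_iff _ _).mpr
        ((PySem.Set.mem_add s t x).mpr (Or.inl ((PySem.Set.contains_iff s x).mp hs)))
    | false =>
      refine Bool.eq_false_iff.mpr (fun htrue => ?_)
      rcases (PySem.Set.mem_add s t x).mp ((PySem.Set.contains_iff _ _).mp htrue) with h | h
      · exact Bool.false_ne_true (hs.symm.trans ((PySem.Set.contains_iff s x).mpr h))
      · exact hx h

-- stable_unique (set + output list) computes the same list as the dict.fromkeys-style dedup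
theorem pvUniq_aux (values : List String) :
    ∀ (seen : PySem.Set String) (out : List String) (d : PySem.Dict String Unit),
    (∀ x, PySem.Set.contains seen x = d.contains x) → out = d.keys →
    (values.foldl
      (fun (acc : PySem.Set String × List String) v =>
        let text := PySem.Str.strip v
        if text = "" ∨ PySem.Set.contains acc.1 text then acc
        else (PySem.Set.add acc.1 text, acc.2 ++ [text]))
      (seen, out)).2 =
    (values.foldl
      (fun (d : PySem.Dict String Unit) v =>
        if PySem.Str.strip v ≠ "" then d.insert (PySem.Str.strip v) () else d) d).keys := by
  induction values with
  | nil => intro seen out d _ hko; simpa using hko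
  | cons v vs ih =>
    intro seen out d hc hko
    simp only [List.foldl_cons]
    by_cases h0 : PySem.Str.strip v = ""
    · rw [if_pos (Or.inl h0), if_neg (not_not_intro h0)]
      exact ih seen out d hc hko
    · by_cases hm : PySem.Set.contains seen (PySem.Str.strip v) = true
      · have hdc : d.contains (PySem.Str.strip v) = true := by rw [← hc]; exact hm
        rw [if_pos (Or.inr hm), if_pos h0]
        refine ih seen out (d.insert (PySem.Str.strip v) ()) (fun x => ?_) ?_
        · rw [hc x, PySem.Dict.contains_insert]
          by_cases hx : x = PySem.Str.strip v
          · subst hx; simp [hdc]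
          · simp [beq_eq_false_iff_ne.mpr hx]
        · rw [PySem.Dict.keys_insert_of_contains d () hdc]; exact hko
      · have hdc : d.contains (PySem.Str.strip v) = false := by
          rw [← hc]; exact Bool.eq_false_iff.mpr hm
        rw [if_neg (fun h => h.elim h0 hm), if_pos h0]
        refine ih (PySem.Set.add seen (PySem.Str.strip v)) (out ++ [PySem.Str.strip v])
          (d.insert (PySem.Str.strip v) ()) (fun x => ?_) ?_
        · rw [pvContains_add, PySem.Dict.contains_insert, hc x]
        · rw [PySem.Dict.keys_insert_of_not_contains d () hdc, hko]

theorem pvStableUnique_eq_pvUniq (values : List String) :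
    pvStableUnique values = pvUniq values := by
  unfold pvStableUnique pvUniq
  rw [List.foldl_filter, List.foldl_map]
  rw [show (fun (d : PySem.Dict String Unit) (v : String) =>
        if decide (PySem.Str.strip v ≠ "") = true then d.insert (PySem.Str.strip v) () else d)
      = (fun (d : PySem.Dict String Unit) (v : String) =>
        if PySem.Str.strip v ≠ "" then d.insert (PySem.Str.strip v) () else d) from
      funext fun d => funext fun v => by by_cases h : PySem.Str.strip v = "" <;> simp [h]]
  exact pvUniq_aux values PySem.Set.empty [] PySem.Dict.empty (fun _ => rfl) rfl

-- every element of pvUniq (hence of pvStableUnique) is a nonempty string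
theorem pvUniq_ne_empty (values : List String) : ∀ h ∈ pvUniq values, h ≠ "" := by
  intro h hmem
  unfold pvUniq at hmem
  rw [PySem.Dict.keys_foldl_insert ((values.map PySem.Str.strip).filter (fun t => t ≠ ""))
      (fun _ _ => ()) PySem.Dict.empty] at hmem
  have hmem' : h ∈ ((values.map PySem.Str.strip).filter (fun t => t ≠ "")) := by
    have h2 := (PySem.Set.update_nil_left
      ((values.map PySem.Str.strip).filter (fun t => t ≠ ""))) ▸ hmem
    exact (PySem.Set.mem_ofList _ h).mp h2
  simpa using List.of_mem_filter hmem'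

theorem pvStableUnique_ne_empty (values : List String) :
    ∀ h ∈ pvStableUnique values, h ≠ "" := by
  rw [pvStableUnique_eq_pvUniq]; exact pvUniq_ne_empty values

-- THE PHASE-1 LEMMA: A's interleaved loop equals B's staged passes, generalised over the
-- running state (g must be the grouping of d's items; d's stored parents are nonempty)
set_option maxHeartbeats 1000000 in
theorem pvPhase1 (prs : List (String × String)) :
    ∀ (d : PySem.Dict String String) (g : PySem.Dict String (List String)) (w : List String),
    (∀ kv ∈ d.items, kv.2 ≠ "") →
    g = d.items.foldl pvGroupStep PySem.Dict.empty →
    prs.foldl pvStepPairA (d, g, w) =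
      (prs.foldl pvRecord d,
       (prs.foldl pvRecord d).items.foldl pvGroupStep PySem.Dict.empty,
       w ++ prs.filterMap (pvWarn1 (prs.foldl pvRecord d))) := by
  induction prs with
  | nil => intro d g w _ hg; simp [hg]
  | cons cp ps ih =>
    intro d g w hinv hg
    simp only [List.foldl_cons, List.filterMap_cons, pvStepPairA]
    by_cases hc : cp.1 = ""
    · have hr : pvRecord d cp = d := by
        unfold pvRecord; rw [if_neg (fun h => h.1 hc)]
      have hw : pvWarn1 (ps.foldl pvRecord d) cp = none := by
        unfold pvWarn1; rw [if_neg (fun h => h.1 hc)]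
      rw [hr, hw, if_pos hc]
      exact ih d g w hinv hg
    · by_cases hp : cp.2 = ""
      · have hr : pvRecord d cp = d := by
          unfold pvRecord; rw [if_neg (fun h => h.2.1 hp)]
        have hw : pvWarn1 (ps.foldl pvRecord d) cp = none := by
          unfold pvWarn1; rw [if_neg (fun h => h.2.1 hp)]
        rw [hr, hw, if_neg hc,
          if_neg (fun h => h.1 hp : ¬(cp.2 ≠ "" ∧ d.get? cp.1 = none)),
          if_neg (fun h => h.1 hp : ¬(cp.2 ≠ "" ∧ d.get? cp.1 ≠ none ∧
            d.get? cp.1 ≠ some "" ∧ d.get? cp.1 ≠ some cp.2))]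
        exact ih d g w hinv hg
      · cases hgd : d.get? cp.1 with
        | none =>
          have hr : pvRecord d cp = d.insert cp.1 cp.2 := by
            unfold pvRecord; rw [if_pos ⟨hc, hp, hgd⟩]
          have hfin : (ps.foldl pvRecord (d.insert cp.1 cp.2)).get? cp.1 = some cp.2 :=
            pvRecord_mono ps _ cp.1 cp.2 (PySem.Dict.get?_insert_self d cp.1 cp.2)
          have hw : pvWarn1 (ps.foldl pvRecord (d.insert cp.1 cp.2)) cp = none := by
            unfold pvWarn1
            rw [if_neg (fun h => h.2.2 hfin)]
          rw [hr, hw, if_neg hc, if_pos (⟨hp, rfl⟩ : cp.2 ≠ "" ∧ (none : Option String) = none)]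
          have hnc : d.contains cp.1 = false := by
            rw [PySem.Dict.contains_eq_isSome_get?, hgd]; rfl
          have hitems : (d.insert cp.1 cp.2).items = d.items ++ [(cp.1, cp.2)] :=
            PySem.Dict.items_insert_of_not_contains d cp.2 hnc
          have hg' : g.insert cp.2 (g.getD cp.2 [] ++ [cp.1]) =
              (d.insert cp.1 cp.2).items.foldl pvGroupStep PySem.Dict.empty := by
            rw [hitems, List.foldl_append, ← hg]; rfl
          have hinv' : ∀ kv ∈ (d.insert cp.1 cp.2).items, kv.2 ≠ "" := by
            intro kv hkv
            rcases (PySem.Dict.mem_items_insert d cp.1 cp.2 kv).mp hkv with h | h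
            · rw [h]; exact hp
            · exact hinv kv h.1
          exact ih (d.insert cp.1 cp.2) _ w hinv' hg'
        | some prev =>
          have hprev : prev ≠ "" := hinv (cp.1, prev) (PySem.Dict.mem_items_of_get?_eq_some d hgd)
          have hr : pvRecord d cp = d := by
            unfold pvRecord
            rw [if_neg (fun h => Option.some_ne_none prev (hgd.symm.trans h.2.2))]
          have hfin : (ps.foldl pvRecord d).get? cp.1 = some prev :=
            pvRecord_mono ps d cp.1 prev hgd
          by_cases hpp : prev = cp.2
          · have hw : pvWarn1 (ps.foldl pvRecord d) cp = none := by
              unfold pvWarn1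
              rw [if_neg (fun h => h.2.2 (by rw [hfin, hpp]))]
            rw [hr, hw, if_neg hc,
              if_neg (fun h => Option.some_ne_none prev h.2 :
                ¬(cp.2 ≠ "" ∧ (some prev : Option String) = none)),
              if_neg (fun h => h.2.2.2 (by rw [hpp]) :
                ¬(cp.2 ≠ "" ∧ (some prev : Option String) ≠ none ∧
                  (some prev : Option String) ≠ some "" ∧
                  (some prev : Option String) ≠ some cp.2))]
            exact ih d g w hinv hg
          · have hw : pvWarn1 (ps.foldl pvRecord d) cp = some (pvAmbigMsg cp.1) := by
              unfold pvWarn1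
              rw [if_pos ⟨hc, hp, fun h => hpp (Option.some.inj (hfin.symm.trans h))⟩]
            rw [hr, hw, if_neg hc,
              if_neg (fun h => Option.some_ne_none prev h.2 :
                ¬(cp.2 ≠ "" ∧ (some prev : Option String) = none)),
              if_pos (⟨hp, Option.some_ne_none prev,
                fun h => hprev (Option.some.inj h),
                fun h => hpp (Option.some.inj h)⟩ :
                cp.2 ≠ "" ∧ (some prev : Option String) ≠ none ∧
                  (some prev : Option String) ≠ some "" ∧
                  (some prev : Option String) ≠ some cp.2)]
            rw [ih d g (w ++ [pvAmbigMsg cp.1]) hinv hg, List.append_assoc]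
            rfl

-- KEY LEMMA: B's iterative descend loop with pending path `path` computes exactly A's
-- recursive compute_depth followed by the unwind of `path` from (depth of p, root_cache[p]).
theorem pvGo_eq_cd (pbc : PySem.Dict String String) (fuel : Nat) :
    ∀ (p : String) (trail : PySem.Set String) (st : PvSt) (path : List String), p ≠ "" →
    pvGoB pbc fuel p path trail st =
      pvUnwind path ((pvCdA pbc fuel p trail st).1,
        ((pvCdA pbc fuel p trail st).2).2.1.getD p p) (pvCdA pbc fuel p trail st).2 := by
  induction fuel with
  | zero => intro p trail st path _; rfl
  | succ fuel ih =>
    intro p trail st path hp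
    simp only [pvGoB, pvCdA]
    rw [if_neg hp]
    cases hg : st.1.get? p with
    | some d => rfl
    | none =>
      dsimp only
      by_cases hgm : PySem.Set.contains trail p = true
      · simp only [if_pos hgm]
        simp [PySem.Dict.getD_insert_self]
      · simp only [if_neg hgm]
        by_cases hpar : pbc.getD p "" = ""
        · simp only [if_pos hpar]
          simp [PySem.Dict.getD_insert_self]
        · simp only [if_neg hpar]
          rw [ih (pbc.getD p "") (PySem.Set.add trail p) st (p :: path) hpar]
          rw [pvUnwind]
          simp [PySem.Dict.getD_insert_self]

-- the depth loop over all_hashes agrees (every hash there is nonempty)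
theorem pvPhase2_eq (pbc : PySem.Dict String String) (fuel : Nat) (hashes : List String)
    (hne : ∀ h ∈ hashes, h ≠ "") :
    ∀ st : PvSt,
      hashes.foldl (fun st h => (pvCdA pbc fuel h PySem.Set.empty st).2) st =
      hashes.foldl (fun st h => pvGoB pbc fuel h [] PySem.Set.empty st) st := by
  induction hashes with
  | nil => intro st; rfl
  | cons h hs ih =>
    intro st
    have hh : h ≠ "" := hne h (List.mem_cons_self ..)
    simp only [List.foldl_cons]
    rw [pvGo_eq_cd pbc fuel h PySem.Set.empty st [] hh]
    exact ih (fun x hx => hne x (List.mem_cons_of_mem _ hx)) _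

-- ===== VERDICT (by name: the statement is the Claim_ definition above) =====
theorem lineage_depths_spec : Claim_equal_lineage_depths := by
  intro events _
  unfold Spec_lineage_depths
  simp only [lineage_depths, lineage_depths_alt]
  have hfold : events.foldl pvStepA (PySem.Dict.empty, PySem.Dict.empty, ([] : List String)) =
      (events.map pvExtract).foldl pvStepPairA (PySem.Dict.empty, PySem.Dict.empty, []) := by
    rw [List.foldl_map]
    rfl
  rw [hfold, pvPhase1 (events.map pvExtract) PySem.Dict.empty PySem.Dict.empty []
    (fun kv h => nomatch h) rfl]
  rw [← pvStableUnique_eq_pvUniq, ← pvStableUnique_eq_pvUniq]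
  rw [pvPhase2_eq
    ((events.map pvExtract).foldl pvRecord PySem.Dict.empty)
    (((events.map pvExtract).foldl pvRecord PySem.Dict.empty).size + 1)
    (pvStableUnique
      (events.map (fun ev => ((PySem.Dict.mk ev).get? "payload_hash").getD "") ++
       events.map (fun ev => ((PySem.Dict.mk ev).get? "parent_payload_hash").getD "")))
    (pvStableUnique_ne_empty _)]
  rfl
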